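-- pv_equiv track=rewrite | github.com/letter5j/leetcode | 354. Russian Doll Envelopes/solution.py | dp
-- ===== SOURCE A (Python) =====
-- from typing import List
--
-- def dp(envelopes: List[List[int]]) -> int:
--     envelopes_length = len(envelopes)
--     dp: List[int] = [1] * envelopes_length
--     max_count = 1
--     for i in range(1, envelopes_length, 1):
--         x = envelopes[i][0]
--         y = envelopes[i][1]
--         for j in range(i):
--             if x > envelopes[j][0] and y > envelopes[j][1]:
--                 dp[i] = max(dp[i], dp[j] + 1)
--                 if dp[i] > max_count:
--                     max_count = dp[i]
--     return max_count
-- ===== SOURCE B (Python) =====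
-- from typing import List
--
-- def dp(envelopes: List[List[int]]) -> int:
--     # Antichain layering: layers[0] is the top layer; an envelope whose longest
--     # strictly-dominating chain (in array order) has length v sits in layer len(layers)-v.
--     layers: List[List[List[int]]] = []
--     for e in envelopes:
--         if not layers:
--             layers = [[e]]
--             continue
--         if any(e[0] > f[0] and e[1] > f[1] for f in layers[0]):
--             layers.insert(0, [e])
--             continue
--         k = 1
--         while k < len(layers) and not any(e[0] > f[0] and e[1] > f[1] for f in layers[k]):
--             k += 1
--         layers[k - 1].append(e)
--     return len(layers)
-- ===== Notes on version B (the rewrite author's own statement) =====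
-- stated objective: alternative
-- what changed: Replaces the quadratic per-index DP table (dp[i] = 1 + max over all dominated predecessors) by a Dilworth-style antichain layering: envelopes are bucketed into layers by chain length and each new envelope scans the layers top-down with early exit, landing just above the first layer containing an envelope it dominates; the answer is the number of layers.
-- intended difference: On the empty list A returns 1 (its max_count is initialised to 1 before any envelope is seen) while B returns 0, the intended length of the longest chain among zero envelopes. — e.g. on dp([]): A returns 1, B returns 0
-- outside the precondition, e.g. on dp([[5], [1, 0]]): A returns 1, B returns 1
import Mathlib
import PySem

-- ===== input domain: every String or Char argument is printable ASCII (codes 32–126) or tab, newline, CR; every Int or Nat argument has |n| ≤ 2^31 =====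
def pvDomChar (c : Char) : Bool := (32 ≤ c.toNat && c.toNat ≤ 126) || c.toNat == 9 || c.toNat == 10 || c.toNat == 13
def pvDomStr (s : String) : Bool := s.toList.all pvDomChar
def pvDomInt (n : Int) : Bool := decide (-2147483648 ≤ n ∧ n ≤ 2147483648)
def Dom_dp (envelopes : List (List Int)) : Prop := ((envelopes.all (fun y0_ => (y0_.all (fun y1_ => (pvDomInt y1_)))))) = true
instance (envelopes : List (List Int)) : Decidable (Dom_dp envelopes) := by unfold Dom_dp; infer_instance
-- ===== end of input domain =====

-- B replaces the quadratic DP table by a Dilworth-style antichain layering scanned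
-- top-down with early exit (alternative algorithm, same worst-case cost); on the
-- empty list B returns the intended 0 where A returns its initial max_count 1 (D_dp).

-- ===== PORT A =====
-- inner loop body: 'for j in range(i): if x > env[j][0] and y > env[j][1]: …'
-- (element accesses use pyGetD; exact wherever Python A does not raise, i.e. under Pre_dp)
def dpInner (envelopes : List (List Int)) (x y i : Int) (st : List Int × Int) (j : Int) :
    List Int × Int :=
  if x > PySem.List.pyGetD (PySem.List.pyGetD envelopes j []) 0 0 ∧
     y > PySem.List.pyGetD (PySem.List.pyGetD envelopes j []) 1 0 then
    let v := max (PySem.List.pyGetD st.1 i 0) (PySem.List.pyGetD st.1 j 0 + 1)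
    (PySem.List.pySetD st.1 i v, if v > st.2 then v else st.2)
  else st

-- outer loop body: 'x = env[i][0]; y = env[i][1]; for j in range(i): …'
def dpOuter (envelopes : List (List Int)) (st : List Int × Int) (i : Int) : List Int × Int :=
  let x := PySem.List.pyGetD (PySem.List.pyGetD envelopes i []) 0 0
  let y := PySem.List.pyGetD (PySem.List.pyGetD envelopes i []) 1 0
  (PySem.List.pyRange 0 i 1).foldl (dpInner envelopes x y i) st

def dp (envelopes : List (List Int)) : Int :=
  ((PySem.List.pyRange 1 (envelopes.length : Int) 1).foldl (dpOuter envelopes)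
      (List.replicate envelopes.length 1, 1)).2

-- ===== PORT B =====
-- 'e[0] > f[0] and e[1] > f[1]'
def dominates (e f : List Int) : Bool :=
  decide (PySem.List.pyGetD e 0 0 > PySem.List.pyGetD f 0 0) &&
  decide (PySem.List.pyGetD e 1 0 > PySem.List.pyGetD f 1 0)

-- the 'k = 1; while …' scan: cur is layers[k-1], the list argument is layers[k:]
def placeGo (e : List Int) (cur : List (List Int)) :
    List (List (List Int)) → List (List (List Int))
  | [] => [cur ++ [e]]
  | l :: ls => if l.any (dominates e) then (cur ++ [e]) :: l :: ls else cur :: placeGo e l ls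

-- one iteration of B's 'for e in envelopes' loop
def place (e : List Int) : List (List (List Int)) → List (List (List Int))
  | [] => [[e]]
  | l :: ls => if l.any (dominates e) then [e] :: l :: ls else placeGo e l ls

def dp_alt (envelopes : List (List Int)) : Int :=
  ((envelopes.foldl (fun ls e => place e ls) []).length : Int)

-- ===== PRECONDITION & SPEC =====
-- Pre_dp excludes lists of two or more envelopes in which some envelope has fewer than
-- two coordinates: there Python A reads e[0]/e[1] and in general raises IndexError
-- (on a few such inputs the short-circuited comparisons let A return, and B, whose
-- comparisons short-circuit identically, returns the same value there).
def Pre_dp (envelopes : List (List Int)) : Prop :=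
  envelopes.length ≤ 1 ∨ ∀ e ∈ envelopes, 2 ≤ e.length
instance (envelopes : List (List Int)) : Decidable (Pre_dp envelopes) := by
  unfold Pre_dp; infer_instance

def pvWitness_dp : List (List Int) := [[5, 4], [6, 7], [2, 3]]

-- On the empty list A returns 1 (max_count is initialised to 1 before any envelope is
-- seen) while B returns 0, the intended length of the longest chain among zero envelopes.
def D_dp (envelopes : List (List Int)) : Prop := envelopes = []
instance (envelopes : List (List Int)) : Decidable (D_dp envelopes) := by
  unfold D_dp; infer_instance

def Spec_dp (envelopes : List (List Int)) (out : Int) : Prop :=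
  ¬ D_dp envelopes → out = dp_alt envelopes
instance (envelopes : List (List Int)) (out : Int) : Decidable (Spec_dp envelopes out) := by
  unfold Spec_dp; infer_instance

def pvDiffWitness_dp : List (List Int) := []
def pvDiffWitnessOut_dp : Int × Int := (1, 0)

-- ===== CLAIM (what is proved, stated in full; the proofs are below) =====
def Claim_unchanged_dp : Prop :=
  ∀ (envelopes : List (List Int)), Dom_dp envelopes → Pre_dp envelopes →
    Spec_dp envelopes (dp envelopes)
def Claim_changed_dp : Prop :=
  Dom_dp (pvDiffWitness_dp) ∧ Pre_dp (pvDiffWitness_dp) ∧ D_dp (pvDiffWitness_dp) ∧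
  dp (pvDiffWitness_dp) = pvDiffWitnessOut_dp.1 ∧
  dp_alt (pvDiffWitness_dp) = pvDiffWitnessOut_dp.2 ∧
  pvDiffWitnessOut_dp.1 ≠ pvDiffWitnessOut_dp.2
def Claim_exact_dp : Prop :=
  ∀ (envelopes : List (List Int)), Dom_dp envelopes → Pre_dp envelopes → D_dp envelopes →
    dp envelopes ≠ dp_alt envelopes

-- ===== LEMMAS AND PROOFS =====

-- The common reference object: the history of (envelope, chain-value) pairs, built
-- left to right; bestv is the DP recurrence 1 + max value of a dominated predecessor.
def bestv (h : List (List Int × Int)) (e : List Int) : Int :=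
  h.foldl (fun m p => if dominates e p.1 then max m (p.2 + 1) else m) 1

def hstep (h : List (List Int × Int)) (e : List Int) : List (List Int × Int) :=
  h ++ [(e, bestv h e)]

def hist (env : List (List Int)) : List (List Int × Int) := env.foldl hstep []

def maxv (h : List (List Int × Int)) : Int := h.foldl (fun m p => max m p.2) 0
def maxv1 (h : List (List Int × Int)) : Int := h.foldl (fun m p => max m p.2) 1

-- the elements of value w, in order
def lvl (h : List (List Int × Int)) (w : Int) : List (List Int) :=
  (h.filter (fun p => p.2 == w)).map (·.1)

-- layers top-down: values d, d-1, …, 1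
def levels (h : List (List Int × Int)) (d : Nat) : List (List (List Int)) :=
  (List.range d).map (fun (k : Nat) => lvl h ((d : Int) - (k : Int)))

-- generic facts about conditional fold-max loops
theorem foldl_cmax_init_le {α : Type} (c : α → Bool) (g : α → Int) (l : List α) (a : Int) :
    a ≤ l.foldl (fun m p => if c p then max m (g p) else m) a := by
  induction l generalizing a with
  | nil => simp
  | cons p l ih =>
    simp only [List.foldl_cons]
    refine le_trans ?_ (ih _)
    split <;> simp

theorem foldl_cmax_le {α : Type} (c : α → Bool) (g : α → Int) (l : List α) :
    ∀ (a : Int) {p : α}, p ∈ l → c p = true →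
      g p ≤ l.foldl (fun m p => if c p then max m (g p) else m) a := by
  induction l with
  | nil => intro a p hp; simp at hp
  | cons q l ih =>
    intro a p hp hc
    simp only [List.foldl_cons]
    rcases List.mem_cons.1 hp with h | h
    · subst h
      refine le_trans ?_ (foldl_cmax_init_le c g l _)
      simp [hc]
    · exact ih _ h hc

theorem foldl_cmax_cases {α : Type} (c : α → Bool) (g : α → Int) (l : List α) (a : Int) :
    l.foldl (fun m p => if c p then max m (g p) else m) a = a ∨
      ∃ p ∈ l, c p = true ∧ l.foldl (fun m p => if c p then max m (g p) else m) a = g p := by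
  induction l generalizing a with
  | nil => simp
  | cons q l ih =>
    simp only [List.foldl_cons]
    by_cases hq : c q = true
    · simp only [hq, if_true]
      rcases ih (max a (g q)) with h | ⟨p, hp, hc, h⟩
      · rcases max_cases a (g q) with ⟨h', _⟩ | ⟨h', _⟩
        · left; rw [h, h']
        · right; exact ⟨q, by simp, hq, by rw [h, h']⟩
      · right; exact ⟨p, by simp [hp], hc, h⟩
    · simp only [hq]
      rcases ih a with h | ⟨p, hp, hc, h⟩
      · left; exact h
      · right; exact ⟨p, by simp [hp], hc, h⟩

theorem foldl_max_init_le (l : List (List Int × Int)) (a : Int) :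
    a ≤ l.foldl (fun m p => max m p.2) a := by
  induction l generalizing a with
  | nil => simp
  | cons p l ih => exact le_trans (le_max_left _ _) (ih _)

theorem foldl_max_le_of_mem (l : List (List Int × Int)) :
    ∀ (a : Int) {p : List Int × Int}, p ∈ l → p.2 ≤ l.foldl (fun m p => max m p.2) a := by
  induction l with
  | nil => intro a p hp; simp at hp
  | cons q l ih =>
    intro a p hp
    rcases List.mem_cons.1 hp with h | h
    · subst h; exact le_trans (le_max_right _ _) (foldl_max_init_le _ _)
    · exact ih _ h

theorem foldl_max_shift (l : List (List Int × Int)) (a b : Int) :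
    l.foldl (fun m p => max m p.2) (max a b) = max a (l.foldl (fun m p => max m p.2) b) := by
  induction l generalizing b with
  | nil => simp
  | cons p l ih => simp only [List.foldl_cons, max_assoc, ih]

-- bestv / maxv facts
theorem one_le_bestv (h : List (List Int × Int)) (e : List Int) : 1 ≤ bestv h e :=
  foldl_cmax_init_le _ _ h 1

theorem bestv_le {h : List (List Int × Int)} {e : List Int} {p : List Int × Int}
    (hp : p ∈ h) (hd : dominates e p.1 = true) : p.2 + 1 ≤ bestv h e :=
  foldl_cmax_le _ _ h 1 hp hd

theorem bestv_cases (h : List (List Int × Int)) (e : List Int) :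
    bestv h e = 1 ∨ ∃ p ∈ h, dominates e p.1 = true ∧ bestv h e = p.2 + 1 :=
  foldl_cmax_cases _ _ h 1

theorem bestv_append (l : List (List Int × Int)) (p : List Int × Int) (e : List Int) :
    bestv (l ++ [p]) e = if dominates e p.1 then max (bestv l e) (p.2 + 1) else bestv l e := by
  simp [bestv, List.foldl_append]

theorem maxv_nonneg (h : List (List Int × Int)) : 0 ≤ maxv h := foldl_max_init_le h 0

theorem maxv_le_of_mem {h : List (List Int × Int)} {p : List Int × Int} (hp : p ∈ h) :
    p.2 ≤ maxv h := foldl_max_le_of_mem h 0 hp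

theorem maxv_hstep (h : List (List Int × Int)) (e : List Int) :
    maxv (hstep h e) = max (maxv h) (bestv h e) := by
  simp [maxv, hstep, List.foldl_append]

theorem maxv1_hstep (h : List (List Int × Int)) (e : List Int) :
    maxv1 (hstep h e) = max (maxv1 h) (bestv h e) := by
  simp [maxv1, hstep, List.foldl_append]

theorem one_le_maxv1 (h : List (List Int × Int)) : 1 ≤ maxv1 h := foldl_max_init_le h 1

theorem maxv1_eq (h : List (List Int × Int)) : maxv1 h = max 1 (maxv h) := by
  have : (1 : Int) = max 1 0 := by norm_num
  rw [maxv1, this, foldl_max_shift]; rfl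

theorem bestv_le_maxv (h : List (List Int × Int)) (e : List Int) :
    bestv h e ≤ maxv h + 1 := by
  rcases bestv_cases h e with hb | ⟨p, hp, _, hb⟩
  · have := maxv_nonneg h; omega
  · have := maxv_le_of_mem hp; omega

-- hist facts
theorem hist_append_singleton (l : List (List Int)) (e : List Int) :
    hist (l ++ [e]) = hstep (hist l) e := by
  simp [hist, List.foldl_append]

theorem length_hist_aux (env : List (List Int)) :
    ∀ h : List (List Int × Int), (env.foldl hstep h).length = h.length + env.length := by
  induction env with
  | nil => simp
  | cons e env ih => intro h; simp [List.foldl_cons, ih, hstep]; omega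

theorem length_hist (env : List (List Int)) : (hist env).length = env.length := by
  simpa using length_hist_aux env []

theorem fst_hist_aux (env : List (List Int)) :
    ∀ h : List (List Int × Int), (env.foldl hstep h).map (·.1) = h.map (·.1) ++ env := by
  induction env with
  | nil => simp
  | cons e env ih => intro h; simp [List.foldl_cons, ih, hstep]

theorem fst_hist (env : List (List Int)) : (hist env).map (·.1) = env := by
  simpa using fst_hist_aux env []



-- well-formedness of a history: values are ≥ 1 and values ≥ 2 have a dominated
-- predecessor of the preceding value
def WF (h : List (List Int × Int)) : Prop :=
  (∀ p ∈ h, 1 ≤ p.2) ∧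
  (∀ p ∈ h, 2 ≤ p.2 → ∃ q ∈ h, dominates p.1 q.1 = true ∧ q.2 = p.2 - 1)

theorem dominates_trans {a b c : List Int} (h1 : dominates a b = true)
    (h2 : dominates b c = true) : dominates a c = true := by
  simp only [dominates, Bool.and_eq_true, decide_eq_true_eq] at *
  omega

theorem WF_hstep {h : List (List Int × Int)} (e : List Int) (hw : WF h) :
    WF (hstep h e) := by
  obtain ⟨h1, h2⟩ := hw
  constructor
  · intro p hp
    rcases List.mem_append.1 hp with hp | hp
    · exact h1 p hp
    · simp at hp; subst hp; exact one_le_bestv h e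
  · intro p hp hp2
    rcases List.mem_append.1 hp with hp | hp
    · obtain ⟨q, hq, hd, he⟩ := h2 p hp hp2
      exact ⟨q, List.mem_append.2 (Or.inl hq), hd, he⟩
    · simp at hp; subst hp
      rcases bestv_cases h e with hb | ⟨q, hq, hd, hb⟩
      · simp at hp2 ⊢; omega
      · exact ⟨q, List.mem_append.2 (Or.inl hq), by simpa using hd, by simp [hb]⟩

theorem WF_hist (env : List (List Int)) : WF (hist env) := by
  have main : ∀ (l : List (List Int)) (h : List (List Int × Int)),
      WF h → WF (l.foldl hstep h) := by
    intro l
    induction l with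
    | nil => intro h hw; simpa using hw
    | cons e l ih => intro h hw; exact ih _ (WF_hstep e hw)
  exact main env [] ⟨by simp, by simp⟩

-- descending a chain: a dominated element of value ≥ w yields a dominated element of value w
theorem descend {h : List (List Int × Int)} (hw : WF h) (e : List Int) :
    ∀ (k : Nat) (w : Int), 1 ≤ w → ∀ p ∈ h, dominates e p.1 = true → p.2 = w + k →
      ∃ q ∈ h, dominates e q.1 = true ∧ q.2 = w := by
  intro k
  induction k with
  | zero => intro w _ p hp hd hv; exact ⟨p, hp, hd, by omega⟩
  | succ k ih =>
    intro w hw1 p hp hd hv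
    obtain ⟨q, hq, hdq, hvq⟩ := hw.2 p hp (by omega)
    exact ih w hw1 q hq (dominates_trans hd hdq) (by omega)

theorem mem_lvl {h : List (List Int × Int)} {w : Int} {f : List Int} :
    f ∈ lvl h w ↔ ∃ p ∈ h, p.1 = f ∧ p.2 = w := by
  simp only [lvl, List.mem_map, List.mem_filter, beq_iff_eq]
  constructor
  · rintro ⟨p, ⟨hp, hv⟩, he⟩; exact ⟨p, hp, he, hv⟩
  · rintro ⟨p, hp, he, hv⟩; exact ⟨p, ⟨hp, hv⟩, he⟩

theorem any_lvl_iff {h : List (List Int × Int)} (hw : WF h) (e : List Int)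
    {w : Int} (hw1 : 1 ≤ w) :
    (lvl h w).any (dominates e) = true ↔ w + 1 ≤ bestv h e := by
  constructor
  · intro ha
    obtain ⟨f, hf, hd⟩ := List.any_eq_true.1 ha
    obtain ⟨p, hp, he, hv⟩ := mem_lvl.1 hf
    have := bestv_le hp (by rwa [he])
    omega
  · intro hb
    rcases bestv_cases h e with h1 | ⟨p, hp, hd, hv⟩
    · omega
    · have hpw : w ≤ p.2 := by omega
      obtain ⟨q, hq, hdq, hvq⟩ := descend hw e (p.2 - w).toNat w hw1 p hp hd (by omega)
      exact List.any_eq_true.2 ⟨q.1, mem_lvl.2 ⟨q, hq, rfl, hvq⟩, hdq⟩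

theorem lvl_hstep (h : List (List Int × Int)) (e : List Int) (w : Int) :
    lvl (hstep h e) w = lvl h w ++ (if bestv h e = w then [e] else []) := by
  simp only [lvl, hstep, List.filter_append, List.map_append]
  congr 1
  split <;> rename_i hc
  · simp [hc]
  · simp [hc]

theorem lvl_eq_nil_of_gt {h : List (List Int × Int)} {w : Int} (hgt : maxv h < w) :
    lvl h w = [] := by
  simp only [lvl, List.map_eq_nil_iff, List.filter_eq_nil_iff]
  intro p hp
  have := maxv_le_of_mem hp
  simp only [beq_iff_eq]
  omega

theorem levels_succ (h : List (List Int × Int)) (d : Nat) :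
    levels h (d + 1) = lvl h ((d : Int) + 1) :: levels h d := by
  simp only [levels, List.range_succ_eq_map, List.map_cons, List.map_map]
  refine congrArg₂ _ (by congr 1) ?_
  apply List.map_congr_left
  intro k _
  simp only [Function.comp_apply]
  congr 1
  push_cast; ring

theorem levels_congr {h h' : List (List Int × Int)} (d : Nat)
    (hc : ∀ w : Int, 1 ≤ w → w ≤ (d : Int) → lvl h w = lvl h' w) :
    levels h d = levels h' d := by
  induction d with
  | zero => rfl
  | succ d ih =>
    rw [levels_succ, levels_succ, hc ((d : Int) + 1) (by omega) (by push_cast; omega),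
      ih (fun w h1 h2 => hc w h1 (by push_cast at *; omega))]

theorem length_levels (h : List (List Int × Int)) (d : Nat) :
    (levels h d).length = d := by simp [levels]

-- the scan placeGo: with layers for values m, m-1, …, 1 below cur (value m+1) and
-- bestv ≤ m+1, it rebuilds the layers of the extended history
theorem placeGo_spec {h : List (List Int × Int)} (hw : WF h) (e : List Int) :
    ∀ m : Nat, bestv h e ≤ (m : Int) + 1 →
      placeGo e (lvl h ((m : Int) + 1)) (levels h m) = levels (hstep h e) (m + 1) := by
  intro m
  induction m with
  | zero =>
    intro hle
    have hv : bestv h e = 1 := le_antisymm (by exact_mod_cast hle) (one_le_bestv h e)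
    rw [(rfl : levels h 0 = []), levels_succ]
    show [lvl h ((0 : Nat) + 1 : Int) ++ [e]] = _
    rw [lvl_hstep, if_pos (by push_cast; omega)]
    rfl
  | succ m ih =>
    intro hle
    have hv1 := one_le_bestv h e
    rw [levels_succ]
    have hany : (lvl h ((m : Int) + 1)).any (dominates e) = true ↔
        (m : Int) + 1 + 1 ≤ bestv h e := any_lvl_iff hw e (by omega)
    simp only [placeGo]
    by_cases hd : (lvl h ((m : Int) + 1)).any (dominates e) = true
    · have hv : bestv h e = (m : Int) + 2 := by
        have := hany.1 hd
        push_cast at hle ⊢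
        omega
      rw [hd, if_pos rfl]
      have hv : bestv h e = (m : Int) + 2 := by
        have := hany.1 hd
        push_cast at hle
        omega
      rw [levels_succ]
      congr 1
      · rw [lvl_hstep, if_pos (by push_cast; omega)]
      · rw [← levels_succ]
        exact levels_congr (m + 1) (fun w hw1 hw2 => by
          rw [lvl_hstep, if_neg (by push_cast at hw2 ⊢; omega), List.append_nil])
    · rw [Bool.eq_false_iff.2 hd]
      simp only [Bool.false_eq_true, if_false]
      have hle' : bestv h e ≤ (m : Int) + 1 := by
        by_contra hc
        push_cast at hle
        exact hd (hany.2 (by omega))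
      rw [ih hle', levels_succ (hstep h e) (m + 1)]
      congr 1
      rw [lvl_hstep, if_neg (by push_cast; omega), List.append_nil]

theorem place_spec {h : List (List Int × Int)} (hw : WF h) (e : List Int) :
    place e (levels h (maxv h).toNat) = levels (hstep h e) (maxv (hstep h e)).toNat := by
  have hv1 := one_le_bestv h e
  have hbm := bestv_le_maxv h e
  have hm0 := maxv_nonneg h
  rcases Nat.eq_zero_or_pos (maxv h).toNat with h0 | hpos
  · -- maxv h = 0: no layers yet; in particular h contributes no level-1 elements
    have hmz : maxv h = 0 := by omega
    have hv : bestv h e = 1 := by omega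
    rw [h0]
    simp only [levels, List.range_zero, List.map_nil, place]
    rw [maxv_hstep, hmz, hv]
    norm_num
    rw [lvl_hstep, lvl_eq_nil_of_gt (by omega), if_pos hv]
    simp
  · set m := (maxv h).toNat - 1 with hm
    have hmv : (maxv h) = (m : Int) + 1 := by omega
    have hsucc : (maxv h).toNat = m + 1 := by omega
    rw [hsucc]
    have hlv : levels h (m + 1) = lvl h ((m : Int) + 1) :: levels h m := levels_succ h m
    rw [hlv]
    simp only [place]
    have hany : (lvl h ((m : Int) + 1)).any (dominates e) = true ↔
        (m : Int) + 1 + 1 ≤ bestv h e := any_lvl_iff hw e (by omega)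
    by_cases hd : (lvl h ((m : Int) + 1)).any (dominates e) = true
    · have hv : bestv h e = (m : Int) + 2 := by
        have := hany.1 hd
        omega
      rw [hd, if_pos rfl]
      have hmax : maxv (hstep h e) = (m : Int) + 2 := by
        rw [maxv_hstep, hmv, hv]; omega
      have htn : (maxv (hstep h e)).toNat = (m + 1) + 1 := by omega
      rw [htn, levels_succ]
      congr 1
      · rw [lvl_hstep, lvl_eq_nil_of_gt (by push_cast; omega),
          if_pos (by push_cast; omega)]
        simp
      · rw [← hlv]
        exact levels_congr (m + 1) (fun w hw1 hw2 => by
          rw [lvl_hstep, if_neg (by push_cast at hw2 ⊢; omega), List.append_nil])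
    · rw [Bool.eq_false_iff.2 hd]
      simp only [Bool.false_eq_true, if_false]
      have hle' : bestv h e ≤ (m : Int) + 1 := by
        by_contra hc
        exact hd (hany.2 (by omega))
      have hmax : (maxv (hstep h e)).toNat = m + 1 := by
        rw [maxv_hstep, hmv]; omega
      rw [hmax]
      exact placeGo_spec hw e m hle'

-- B's loop invariant and result
theorem foldl_place_eq (env : List (List Int)) :
    ∀ h : List (List Int × Int), WF h →
      env.foldl (fun ls e => place e ls) (levels h (maxv h).toNat)
        = levels (env.foldl hstep h) (maxv (env.foldl hstep h)).toNat := by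
  induction env with
  | nil => intro h _; rfl
  | cons e env ih =>
    intro h hw
    simp only [List.foldl_cons]
    rw [place_spec hw e]
    exact ih _ (WF_hstep e hw)

theorem dp_alt_eq (env : List (List Int)) : dp_alt env = maxv (hist env) := by
  have h0 : WF ([] : List (List Int × Int)) := ⟨by simp, by simp⟩
  have hkey := foldl_place_eq env [] h0
  have hnil : levels ([] : List (List Int × Int))
      (maxv ([] : List (List Int × Int))).toNat = [] := rfl
  rw [hnil] at hkey
  rw [dp_alt, hist, hkey, length_levels]
  have := maxv_nonneg (env.foldl hstep [])
  omega

-- A-side helpers: reading and writing position P.length in P ++ b :: R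
theorem take_concat {α : Type} (l : List α) (m : Nat) (h : m < l.length) :
    l.take (m + 1) = l.take m ++ [l[m]] := by
  rw [List.take_add_one, List.getElem?_eq_getElem h]
  rfl

theorem getD_append_len (P R : List Int) (b d : Int) (n : Nat) (h : P.length = n) :
    (P ++ b :: R).getD n d = b := by
  subst h; simp

theorem getD_append_lt (P R : List Int) (b d : Int) (m : Nat) (h : m < P.length) :
    (P ++ b :: R).getD m d = P.getD m d := by
  simp [List.getD, List.getElem?_append_left h]

theorem set_append_len (P R : List Int) (b v : Int) (n : Nat) (h : P.length = n) :
    (P ++ b :: R).set n v = P ++ v :: R := by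
  subst h
  rw [List.set_append_right _ _ (le_refl _)]
  simp

-- the inner 'for j in range(i)' loop computes the DP recurrence and keeps the running max
theorem innerL (env : List (List Int)) (e : List Int) (i : Nat) (hin : i ≤ env.length)
    (R : List Int) :
    ∀ m : Nat, m ≤ i → ∀ M : Int, 1 ≤ M →
      (PySem.List.pyRange 0 (m : Int) 1).foldl
          (dpInner env (PySem.List.pyGetD e 0 0) (PySem.List.pyGetD e 1 0) (i : Int))
          ((hist (env.take i)).map (·.2) ++ 1 :: R, M)
        = ((hist (env.take i)).map (·.2) ++ bestv ((hist (env.take i)).take m) e :: R,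
           max M (bestv ((hist (env.take i)).take m) e)) := by
  set hi := hist (env.take i) with hhi
  have hilen : hi.length = i := by rw [hhi, length_hist, List.length_take]; omega
  have hPlen : (hi.map (·.2)).length = i := by simp [hilen]
  intro m
  induction m with
  | zero =>
    intro _ M hM
    rw [PySem.List.pyRange_one_eq_nil (by omega)]
    simp only [List.foldl_nil, List.take_zero]
    simp only [bestv, List.foldl_nil]
    rw [(by omega : max M 1 = M)]
  | succ m ih =>
    intro hmi M hM
    have hm : m < i := by omega
    have hmlen : m < env.length := by omega
    have hmhi : m < hi.length := by omega
    rw [(by push_cast; ring : ((m + 1 : Nat) : Int) = (m : Int) + 1),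
      PySem.List.pyRange_one_succ_right (by omega), List.foldl_append,
      ih (by omega) M hM]
    simp only [List.foldl_cons, List.foldl_nil]
    have henv : PySem.List.pyGetD env (m : Int) [] = env[m] := by
      rw [PySem.List.pyGetD_natCast]
      exact List.getD_eq_getElem _ _ hmlen
    have hfst : (hi[m]'hmhi).1 = env[m] := by
      have h1 : (hi.map (·.1)).getD m [] = (env.take i).getD m [] := by
        rw [hhi, fst_hist]
      rw [List.getD_eq_getElem _ _ (by simp [hmhi]),
        List.getD_eq_getElem _ _ (by simp; omega)] at h1
      simpa [List.getElem_take] using h1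
    have hsnd : (hi.map (·.2)).getD m 0 = (hi[m]'hmhi).2 := by
      rw [List.getD_eq_getElem _ _ (by simp [hmhi])]
      simp
    rw [take_concat hi m hmhi, bestv_append]
    set P := hi.map (·.2) with hP
    set bm := bestv (hi.take m) e with hbm
    simp only [dpInner, henv]
    by_cases hC : PySem.List.pyGetD e 0 0 > PySem.List.pyGetD env[m] 0 0 ∧
        PySem.List.pyGetD e 1 0 > PySem.List.pyGetD env[m] 1 0
    · rw [if_pos hC]
      have hdom : dominates e (hi[m]'hmhi).1 = true := by
        rw [hfst]
        simp only [dominates, Bool.and_eq_true, decide_eq_true_eq]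
        exact ⟨hC.1, hC.2⟩
      rw [if_pos hdom]
      simp only [PySem.List.pyGetD_natCast, PySem.List.pySetD_natCast]
      rw [getD_append_len _ _ _ _ _ hPlen, getD_append_lt _ _ _ _ _ (by omega), hsnd,
        set_append_len _ _ _ _ _ hPlen]
      have hble : bm ≤ max bm ((hi[m]'hmhi).2 + 1) := le_max_left _ _
      refine congrArg₂ _ rfl ?_
      omega
    · rw [if_neg hC]
      have hdom : dominates e (hi[m]'hmhi).1 = false := by
        cases hb : dominates e (env[m]) with
        | false => rw [hfst]; exact hb
        | true =>
          exfalso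
          apply hC
          simpa [dominates] using hb
      simp only [hdom, Bool.false_eq_true, if_false]

-- the outer 'for i in range(1, n, 1)' loop: dp table = values of the history, running max
theorem outerL (env : List (List Int)) :
    ∀ m : Nat, 1 ≤ m → m ≤ env.length →
      (PySem.List.pyRange 1 (m : Int) 1).foldl (dpOuter env)
          (List.replicate env.length 1, 1)
        = ((hist (env.take m)).map (·.2) ++ List.replicate (env.length - m) 1,
           maxv1 (hist (env.take m))) := by
  intro m
  induction m with
  | zero => intro h; omega
  | succ m ih =>
    intro _ hle
    by_cases hm0 : m = 0
    · subst hm0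
      obtain ⟨a, t, rfl⟩ : ∃ a t, env = a :: t := by
        cases env with
        | nil => simp at hle
        | cons a t => exact ⟨a, t, rfl⟩
      rw [PySem.List.pyRange_one_eq_nil (by norm_num), List.foldl_nil]
      have h1 : (a :: t).take 1 = [a] := rfl
      have h2 : hist [a] = [(a, 1)] := rfl
      rw [h1, h2]
      have h3 : maxv1 [(a, (1 : Int))] = 1 := by simp [maxv1]
      rw [h3]
      simp [List.replicate_succ]
    · have h1m : 1 ≤ m := by omega
      have hmn : m < env.length := by omega
      rw [(by push_cast; ring : ((m + 1 : Nat) : Int) = (m : Int) + 1),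
        PySem.List.pyRange_one_succ_right (by omega), List.foldl_append,
        ih h1m (by omega), List.foldl_cons, List.foldl_nil]
      simp only [dpOuter]
      have henv : PySem.List.pyGetD env (m : Int) [] = env[m] := by
        rw [PySem.List.pyGetD_natCast]
        exact List.getD_eq_getElem _ _ hmn
      rw [henv]
      have hrep : List.replicate (env.length - m) (1 : Int)
          = 1 :: List.replicate (env.length - (m + 1)) 1 := by
        rw [← List.replicate_succ]
        congr 1
        omega
      rw [hrep]
      have hkey := innerL env (env[m]) m (by omega)
        (List.replicate (env.length - (m + 1)) 1) m (le_refl m)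
        (maxv1 (hist (env.take m))) (one_le_maxv1 _)
      rw [hkey]
      have htake : (hist (env.take m)).take m = hist (env.take m) :=
        List.take_of_length_le (by rw [length_hist, List.length_take]; omega)
      rw [htake, take_concat env m hmn, hist_append_singleton, maxv1_hstep]
      simp only [hstep, List.map_append, List.map_cons, List.map_nil]
      rw [List.append_assoc]
      rfl

-- A's result for a nonempty input
theorem dp_eq (env : List (List Int)) (hne : env ≠ []) : dp env = dp_alt env := by
  have hn : 1 ≤ env.length := List.length_pos_of_ne_nil hne
  have h := outerL env env.length hn (le_refl _)
  rw [List.take_length] at h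
  rw [dp, h]
  have h1 : env.length - env.length = 0 := by omega
  rw [h1]
  rw [dp_alt_eq, maxv1_eq]
  have hm1 : 1 ≤ maxv (hist env) := by
    have hlen : 0 < (hist env).length := by rw [length_hist]; omega
    obtain ⟨p, hp⟩ := List.exists_mem_of_length_pos hlen
    have := (WF_hist env).1 p hp
    have := maxv_le_of_mem hp
    omega
  simp only []
  omega

theorem dp_spec : Claim_unchanged_dp := by
  intro env _ _ hD
  exact dp_eq env (fun h => hD h)
theorem dp_changed : Claim_changed_dp := by unfold Claim_changed_dp; decide
theorem dp_tight : Claim_exact_dp := by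
  intro env _ _ hD
  have henv : env = [] := hD
  subst henv
  decide
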